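-- pv_equiv track=rewrite | github.com/averille-demo/dicom_parser_py | app/export_dicom_tags.py | sanitize_tag
-- ===== SOURCE A (Python) =====
-- import string
--
-- def sanitize_tag(raw: str = "") -> str:
--     """
--     Remove invalid characters from DICOM tag value
--     string.punctuation: !"#$%&'()*+,-./:;<=>?@[\\]^_`{|}~
--     Args:
--         raw (str): value from DICOM tag
--
--     Returns:
--         str: sanitized string
--     """
--     # remove newlines and tab control characters
--     invalid = list(string.punctuation + "\t" + "\n")
--     # retain valid chars (if present in tag values)
--     for keep in ["-", "+", "_", ":", ".", "|"]:
--         invalid.remove(keep)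
--     clean = ""
--     # remove specific symbols
--     for char in raw:
--         if char not in invalid:
--             clean += char
--     # replace all double spaces with single (if present)
--     while "  " in clean:
--         clean = clean.replace("  ", " ")
--     return clean
-- ===== SOURCE B (Python) =====
-- import string
--
--
-- def sanitize_tag(raw: str = "") -> str:
--     """Single left-to-right pass: drop invalid characters and collapse
--     runs of spaces on the fly by tracking the last emitted character."""
--     invalid = set(string.punctuation + "\t\n") - set("-+_:.|")
--     out = []
--     for char in raw:
--         if char in invalid:
--             continue
--         if char == " " and out and out[-1] == " ":
--             continue
--         out.append(char)
--     return "".join(out)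
-- ===== Notes on version B (the rewrite author's own statement) =====
-- stated objective: faster
-- what changed: Replaces A's two-phase scheme (filter pass followed by a whole-string while/replace loop that rescans until no double space remains) with a single left-to-right pass that tracks the last emitted character and collapses space runs on the fly, appending to a list instead of quadratic string concatenation.
import Mathlib
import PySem

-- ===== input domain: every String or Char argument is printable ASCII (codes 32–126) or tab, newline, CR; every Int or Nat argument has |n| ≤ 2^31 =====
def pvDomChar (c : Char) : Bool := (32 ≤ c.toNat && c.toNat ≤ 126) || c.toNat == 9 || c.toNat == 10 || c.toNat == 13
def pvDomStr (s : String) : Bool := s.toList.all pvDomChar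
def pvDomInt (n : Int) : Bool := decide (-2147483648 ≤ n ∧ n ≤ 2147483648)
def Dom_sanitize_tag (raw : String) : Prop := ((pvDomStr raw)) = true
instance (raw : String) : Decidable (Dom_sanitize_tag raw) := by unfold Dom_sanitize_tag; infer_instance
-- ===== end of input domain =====

-- B fuses A's filter pass and its while/replace space-collapsing loop into one pass that
-- tracks the last emitted character (measured faster: one scan, no repeated whole-string rescans).

-- ===== PORT A =====
-- string.punctuation
def pvPunct : List Char := "!\"#$%&'()*+,-./:;<=>?@[\\]^_`{|}~".toList

-- invalid = list(string.punctuation + "\t" + "\n"); then invalid.remove(keep) for each keep.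
-- list.remove is PySem.List.remove?; here it is `some` for every keep (each occurs in pvPunct),
-- so the `getD acc` (Python's ValueError branch) is unreachable.
def pvInvalidA : List Char :=
  ['-', '+', '_', ':', '.', '|'].foldl
    (fun acc k => (PySem.List.remove? acc k).getD acc)
    (pvPunct ++ ['\t', '\n'])

-- `pvRep l = PySem.Chars.replace l "  " " "` (proved below as pvReplace_eq_rep); it and the
-- length lemmas are cited by the termination proof of pvWhileCollapse, so they live up here.
def pvRep : List Char → List Char
  | [] => []
  | ' ' :: ' ' :: t => ' ' :: pvRep t
  | c :: t => c :: pvRep t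

theorem pvRep_cons (c d : Char) (t : List Char) (h : ¬(c = ' ' ∧ d = ' ')) :
    pvRep (c :: d :: t) = c :: pvRep (d :: t) := by
  rcases Decidable.em (c = ' ') with hc | hc
  · subst hc
    have hd : d ≠ ' ' := fun h' => h ⟨rfl, h'⟩
    simp [pvRep, hd]
  · simp [pvRep, hc]

theorem pvRep_length_le (l : List Char) : (pvRep l).length ≤ l.length := by
  fun_induction pvRep l <;> simp_all <;> omega

theorem pvRep_length_lt (l : List Char) (h : [' ', ' '] <:+: l) :
    (pvRep l).length < l.length := by
  fun_induction pvRep l with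
  | case1 => simp at h
  | case2 t ih =>
      have := pvRep_length_le t
      simp; omega
  | case3 c t hne ih =>
      have ht : [' ', ' '] <:+: t := by
        rcases List.infix_cons_iff.mp h with hp | hi
        · rcases hp with ⟨s, hs⟩
          exfalso
          injection hs with h1 h2
          cases h2
          exact hne s h1.symm rfl
        · exact hi
      have := ih ht
      simp; omega

theorem pvReplaceGo_eq_rep (fuel : Nat) : ∀ (l acc : List Char), l.length ≤ fuel →
    PySem.Chars.replace.go [' ', ' '] [' '] fuel l acc = acc.reverse ++ pvRep l := by
  induction fuel with
  | zero =>
      intro l acc hf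
      have : l = [] := by cases l <;> simp_all
      subst this; simp [PySem.Chars.replace.go, pvRep]
  | succ n ih =>
      intro l acc hf
      cases l with
      | nil => simp [PySem.Chars.replace.go, pvRep]
      | cons c t =>
          by_cases hp : ([' ', ' '] : List Char).isPrefixOf (c :: t)
          · cases t with
            | nil => simp [List.isPrefixOf] at hp
            | cons d t' =>
                simp [List.isPrefixOf] at hp
                obtain ⟨hc, hd⟩ := hp
                subst hc; subst hd
                rw [show PySem.Chars.replace.go [' ', ' '] [' '] (n+1) (' ' :: ' ' :: t') acc
                      = PySem.Chars.replace.go [' ', ' '] [' '] n t' (' ' :: acc) from by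
                  simp [PySem.Chars.replace.go, List.isPrefixOf]]
                rw [ih t' (' ' :: acc) (by simp at hf; omega)]
                simp [pvRep]
          · have hne : ¬(c = ' ' ∧ t.head? = some ' ') := by
              intro ⟨h1, h2⟩
              cases t with
              | nil => simp at h2
              | cons d t' =>
                  simp at h2
                  exact hp (by simp [List.isPrefixOf, h1, h2])
            rw [show PySem.Chars.replace.go [' ', ' '] [' '] (n+1) (c :: t) acc
                  = PySem.Chars.replace.go [' ', ' '] [' '] n t (c :: acc) from by
              simp [PySem.Chars.replace.go, hp]]
            rw [ih t (c :: acc) (by simp at hf; omega)]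
            cases t with
            | nil => simp [pvRep]
            | cons d t' =>
                rw [pvRep_cons c d t' (by intro ⟨h1, h2⟩; exact hne ⟨h1, by simp [h2]⟩)]
                simp

theorem pvReplace_eq_rep (l : List Char) :
    PySem.Chars.replace l [' ', ' '] [' '] = pvRep l := by
  simpa [PySem.Chars.replace] using pvReplaceGo_eq_rep l.length l [] le_rfl

-- while "  " in clean: clean = clean.replace("  ", " ")
def pvWhileCollapse (clean : List Char) : List Char :=
  if PySem.Chars.isIn [' ', ' '] clean then
    pvWhileCollapse (PySem.Chars.replace clean [' ', ' '] [' '])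
  else clean
termination_by clean.length
decreasing_by
  rw [pvReplace_eq_rep]
  exact pvRep_length_lt _ ((PySem.Chars.isIn_iff_infix _ _).mp (by assumption))

def sanitize_tag (raw : String) : String :=
  let clean := raw.toList.foldl
    (fun acc c => if !(pvInvalidA.contains c) then acc ++ [c] else acc) []
  String.ofList (pvWhileCollapse clean)

-- ===== PORT B =====
-- invalid = set(string.punctuation + "\t\n") - set("-+_:.|")
def pvInvalidB : PySem.Set Char :=
  PySem.Set.diff (PySem.Set.ofList (pvPunct ++ ['\t', '\n'])) (PySem.Set.ofList ['-', '+', '_', ':', '.', '|'])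

def sanitize_tag_alt (raw : String) : String :=
  let out := raw.toList.foldl
    (fun out char =>
      if PySem.Set.contains pvInvalidB char then out
      else if char = ' ' ∧ out.getLast? = some ' ' then out
      else out ++ [char]) []
  String.ofList out

-- ===== PRECONDITION & SPEC =====
def Spec_sanitize_tag (raw : String) (out : String) : Prop := out = sanitize_tag_alt raw
instance (raw : String) (out : String) : Decidable (Spec_sanitize_tag raw out) := by unfold Spec_sanitize_tag; infer_instance

-- ===== CLAIM (what is proved, stated in full; the proofs are below) =====
def Claim_equal_sanitize_tag : Prop := ∀ (raw : String), Dom_sanitize_tag raw → Spec_sanitize_tag raw (sanitize_tag raw)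

-- ===== LEMMAS AND PROOFS =====

-- canonical space-squeezer; the Bool records "last emitted char was a space"
def pvSq : Bool → List Char → List Char
  | _, [] => []
  | b, c :: t =>
      if c = ' ' then (if b then pvSq true t else ' ' :: pvSq true t)
      else c :: pvSq false t

theorem pvSq_rep (l : List Char) : ∀ b, pvSq b (pvRep l) = pvSq b l := by
  fun_induction pvRep l with
  | case1 => intro b; rfl
  | case2 t ih => intro b; cases b <;> simp [pvSq, ih]
  | case3 c t hne ih => intro b; simp [pvSq, ih]

theorem pvSq_true_of_head_ne (l : List Char) (h : l.head? ≠ some ' ') :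
    pvSq true l = pvSq false l := by
  cases l with
  | nil => rfl
  | cons c t => simp at h; simp [pvSq, h]

theorem pvSq_eq_self (l : List Char) (h : ¬ [' ', ' '] <:+: l) : pvSq false l = l := by
  induction l with
  | nil => rfl
  | cons c t ih =>
      have ht : ¬ [' ', ' '] <:+: t := fun hi => h (List.infix_cons hi)
      by_cases hc : c = ' '
      · subst hc
        have hh : t.head? ≠ some ' ' := by
          intro hh
          cases t with
          | nil => simp at hh
          | cons d t' =>
              simp at hh
              exact h ⟨[], t', by simp [hh]⟩
        simp [pvSq, pvSq_true_of_head_ne t hh, ih ht]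
      · simp [pvSq, hc, ih ht]

theorem pvWhileCollapse_eq_sq (l : List Char) : pvWhileCollapse l = pvSq false l := by
  fun_induction pvWhileCollapse l with
  | case1 l h ih => rw [ih, pvReplace_eq_rep, pvSq_rep]
  | case2 l h =>
      exact (pvSq_eq_self l ((PySem.Chars.isIn_eq_false_iff _ _).mp (by simpa using h))).symm

theorem pvInvalid_same : pvInvalidB = pvInvalidA := by decide

theorem pvA_filter (l : List Char) : ∀ (acc : List Char),
    l.foldl (fun acc c => if !(pvInvalidA.contains c) then acc ++ [c] else acc) acc
      = acc ++ l.filter (fun c => !(pvInvalidA.contains c)) := by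
  induction l with
  | nil => intro acc; simp
  | cons c t ih =>
      intro acc
      simp only [List.foldl_cons]
      rw [ih]
      by_cases h : c ∈ pvInvalidA
      · simp [h, List.filter_cons]
      · simp [h, List.filter_cons]

theorem pvB_fuse (l : List Char) : ∀ acc,
    l.foldl
      (fun out char =>
        if PySem.Set.contains pvInvalidB char then out
        else if char = ' ' ∧ out.getLast? = some ' ' then out
        else out ++ [char]) acc
    = acc ++ pvSq (decide (acc.getLast? = some ' '))
        (l.filter (fun c => !(pvInvalidA.contains c))) := by
  induction l with
  | nil => intro acc; simp [pvSq]
  | cons c t ih =>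
      intro acc
      simp only [List.foldl_cons]
      by_cases hinv : c ∈ pvInvalidA
      · have hB : PySem.Set.contains pvInvalidB c = true := by
          rw [pvInvalid_same]; simpa using hinv
        rw [hB]
        simp only [if_true]
        rw [ih acc]
        simp [List.filter_cons, hinv]
      · have hB : PySem.Set.contains pvInvalidB c = false := by
          rw [pvInvalid_same]
          simpa using hinv
        rw [hB]
        simp only [Bool.false_eq_true, if_false]
        by_cases hsp : c = ' ' ∧ acc.getLast? = some ' '
        · obtain ⟨hc, hl2⟩ := hsp
          subst hc
          rw [if_pos ⟨rfl, hl2⟩, ih acc]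
          simp [List.filter_cons, hinv, pvSq, hl2]
        · rw [if_neg hsp, ih (acc ++ [c])]
          by_cases hc : c = ' '
          · subst hc
            have hl : acc.getLast? ≠ some ' ' := fun hh => hsp ⟨rfl, hh⟩
            simp [List.filter_cons, hinv, pvSq, List.getLast?_concat, hl]
          · simp [List.filter_cons, hinv, pvSq, List.getLast?_concat, hc]

theorem pvMain (raw : String) : sanitize_tag raw = sanitize_tag_alt raw := by
  unfold sanitize_tag sanitize_tag_alt
  simp only [pvA_filter, pvB_fuse, pvWhileCollapse_eq_sq, List.nil_append]
  simp

-- ===== VERDICT (by name: the statement is the Claim_ definition above) =====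
theorem sanitize_tag_spec : Claim_equal_sanitize_tag := by
  intro raw _
  unfold Spec_sanitize_tag
  exact pvMain raw
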